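-- pv_equiv track=rewrite | github.com/Niikoz/SML-B2-OPENIT | SML-V2-Sans_commentaire.py | create_stats_table
-- ===== SOURCE A (Python) =====
-- def create_stats_table(dico):
--     tableauStat = {}
--     for cle in dico.keys():
--         lttrAvt = cle[:2]
--         val = cle[2]
--         if lttrAvt not in tableauStat:
--             tableauStat[lttrAvt] = {}
--         if val not in tableauStat[lttrAvt]:
--             tableauStat[lttrAvt][val] = dico[cle]
--         else:
--             tableauStat[lttrAvt][val] += dico[cle]
--     return tableauStat
-- ===== SOURCE B (Python) =====
-- def create_stats_table(dico):
--     # Two-pass decomposition: group the keys by 2-char prefix first, then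
--     # assemble each inner dict per group with the first-assign-else-+= rule.
--     groups = {}
--     for cle in dico.keys():
--         groups.setdefault(cle[:2], []).append(cle)
--     table = {}
--     for prefix, keys in groups.items():
--         inner = {}
--         for cle in keys:
--             val = cle[2]
--             if val not in inner:
--                 inner[val] = dico[cle]
--             else:
--                 inner[val] += dico[cle]
--         table[prefix] = inner
--     return table
-- ===== Notes on version B (the rewrite author's own statement) =====
-- stated objective: alternative
-- what changed: Instead of A's single pass that updates a nested dict per key, B first builds a grouping index prefix -> list of keys, then assembles each inner dict per group in a second pass with the same first-assign-else-+= rule.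
import Mathlib
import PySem

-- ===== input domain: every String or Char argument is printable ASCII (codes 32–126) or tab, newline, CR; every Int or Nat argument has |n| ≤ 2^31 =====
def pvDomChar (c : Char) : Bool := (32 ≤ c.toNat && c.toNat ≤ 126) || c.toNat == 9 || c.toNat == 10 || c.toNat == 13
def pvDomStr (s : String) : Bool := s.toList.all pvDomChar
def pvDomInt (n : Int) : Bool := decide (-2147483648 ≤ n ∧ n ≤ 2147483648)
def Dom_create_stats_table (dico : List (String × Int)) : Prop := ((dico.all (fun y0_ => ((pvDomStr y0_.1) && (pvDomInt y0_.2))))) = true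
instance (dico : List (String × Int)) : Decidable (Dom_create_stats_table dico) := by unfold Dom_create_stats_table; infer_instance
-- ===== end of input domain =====

-- B groups the keys by their 2-char prefix in a first pass, then assembles each
-- inner table per group in a second pass (different decomposition, same cost).

-- shared transliterations of the Python expressions cle[:2], cle[2] and dico[cle]
def pvPrefix (cle : String) : String := PySem.Str.slice cle none (some 2)
-- cle[2] (a 1-char string); Pre_ keeps the index in range, so the default is never read
def pvThird (cle : String) : String := String.ofList [PySem.List.pyGetD cle.toList 2 ' ']
-- dico[cle]; every iterated key is present, so the default is never read
def pvLook (dico : List (String × Int)) (cle : String) : Int := (PySem.Dict.mk dico).getD cle 0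

-- ===== PORT A =====
def create_stats_table (dico : List (String × Int)) : List (String × List (String × Int)) :=
  let tableauStat :=
    (PySem.Dict.mk dico).keys.foldl
      (fun (tableauStat : PySem.Dict String (PySem.Dict String Int)) cle =>
        let lttrAvt := pvPrefix cle
        let val := pvThird cle
        let tableauStat :=
          if !(tableauStat.contains lttrAvt) then tableauStat.insert lttrAvt PySem.Dict.empty
          else tableauStat
        let inner := tableauStat.getD lttrAvt PySem.Dict.empty
        if !(inner.contains val) then
          tableauStat.insert lttrAvt (inner.insert val (pvLook dico cle))
        else
          tableauStat.insert lttrAvt (inner.insert val (inner.getD val 0 + pvLook dico cle)))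
      PySem.Dict.empty
  tableauStat.items.map (fun p => (p.1, p.2.items))

-- ===== PORT B =====
def pvBuildInner (dico : List (String × Int)) (keys : List String) : PySem.Dict String Int :=
  keys.foldl
    (fun inner cle =>
      let val := pvThird cle
      if !(inner.contains val) then inner.insert val (pvLook dico cle)
      else inner.insert val (inner.getD val 0 + pvLook dico cle))
    PySem.Dict.empty

def create_stats_table_alt (dico : List (String × Int)) : List (String × List (String × Int)) :=
  let groups :=
    (PySem.Dict.mk dico).keys.foldl
      (fun (groups : PySem.Dict String (List String)) cle =>
        -- groups.setdefault(cle[:2], []).append(cle)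
        groups.modify (pvPrefix cle) [] (· ++ [cle]))
      PySem.Dict.empty
  let table :=
    groups.items.foldl
      (fun (table : PySem.Dict String (PySem.Dict String Int)) p =>
        table.insert p.1 (pvBuildInner dico p.2))
      PySem.Dict.empty
  table.items.map (fun p => (p.1, p.2.items))

-- ===== PRECONDITION & SPEC =====
-- Pre_ excludes keys shorter than 3 characters (cle[2] raises IndexError in A) and
-- association lists with a repeated key, which do not represent a Python dict (a dict
-- cannot contain a duplicate key, so such a list is an ambiguous encoding of the input).
def Pre_create_stats_table (dico : List (String × Int)) : Prop :=
  (dico.map Prod.fst).Nodup ∧ ∀ p ∈ dico, 3 ≤ p.1.toList.length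
instance (dico : List (String × Int)) : Decidable (Pre_create_stats_table dico) := by
  unfold Pre_create_stats_table; infer_instance

def pvWitness_create_stats_table : (List (String × Int)) := [("abc", 1), ("abd", 2), ("xyz", 3)]

def Spec_create_stats_table (dico : List (String × Int)) (out : List (String × List (String × Int))) : Prop := out = create_stats_table_alt dico
instance (dico : List (String × Int)) (out : List (String × List (String × Int))) : Decidable (Spec_create_stats_table dico out) := by unfold Spec_create_stats_table; infer_instance

-- ===== CLAIM (what is proved, stated in full; the proofs are below) =====
def Claim_equal_create_stats_table : Prop := ∀ (dico : List (String × Int)), Dom_create_stats_table dico → Pre_create_stats_table dico → Spec_create_stats_table dico (create_stats_table dico)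

-- ===== LEMMAS AND PROOFS =====

-- proof-side names for the loop bodies of the two ports
def pvInnerStep (dico : List (String × Int)) (inner : PySem.Dict String Int) (cle : String) : PySem.Dict String Int :=
  let val := pvThird cle
  if !(inner.contains val) then inner.insert val (pvLook dico cle)
  else inner.insert val (inner.getD val 0 + pvLook dico cle)

def pvStepA (dico : List (String × Int)) (tab : PySem.Dict String (PySem.Dict String Int)) (cle : String) : PySem.Dict String (PySem.Dict String Int) :=
  let lttrAvt := pvPrefix cle
  let val := pvThird cle
  let tab := if !(tab.contains lttrAvt) then tab.insert lttrAvt PySem.Dict.empty else tab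
  let inner := tab.getD lttrAvt PySem.Dict.empty
  if !(inner.contains val) then tab.insert lttrAvt (inner.insert val (pvLook dico cle))
  else tab.insert lttrAvt (inner.insert val (inner.getD val 0 + pvLook dico cle))

def pvStepG (g : PySem.Dict String (List String)) (cle : String) : PySem.Dict String (List String) :=
  g.modify (pvPrefix cle) [] (· ++ [cle])

-- value-wise image of a grouping dict under pvBuildInner
def pvPhi (dico : List (String × Int)) (g : PySem.Dict String (List String)) : PySem.Dict String (PySem.Dict String Int) :=
  PySem.Dict.mk (g.items.map (fun p => (p.1, pvBuildInner dico p.2)))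

lemma pvKeys_phi (dico : List (String × Int)) (g : PySem.Dict String (List String)) :
    (pvPhi dico g).keys = g.keys := by
  simp [pvPhi, PySem.Dict.keys]

lemma pvContains_phi (dico : List (String × Int)) (g : PySem.Dict String (List String)) (k : String) :
    (pvPhi dico g).contains k = g.contains k := by
  simp [PySem.Dict.contains_eq_decide_mem_keys, pvKeys_phi]

lemma pvGetD_phi (dico : List (String × Int)) (g : PySem.Dict String (List String)) (k : String)
    (hnd : g.keys.Nodup) :
    (pvPhi dico g).getD k PySem.Dict.empty = pvBuildInner dico (g.getD k []) := by
  by_cases h : g.contains k = true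
  · rw [PySem.Dict.contains_eq_isSome_get?] at h
    obtain ⟨cs, hcs⟩ := Option.isSome_iff_exists.mp h
    have hmem : (k, cs) ∈ g.items := (PySem.Dict.get?_eq_some_iff_mem_items g k cs hnd).mp hcs
    have hmem' : (k, pvBuildInner dico cs) ∈ (pvPhi dico g).items := by
      simpa [pvPhi] using List.mem_map_of_mem (f := fun p => (p.1, pvBuildInner dico p.2)) hmem
    rw [PySem.Dict.getD_of_mem_items _ hmem' (by rw [pvKeys_phi]; exact hnd),
        PySem.Dict.getD_of_mem_items _ hmem hnd]
  · have h' : g.contains k = false := by simpa using h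
    rw [PySem.Dict.getD_of_not_contains _ _ (by rw [pvContains_phi]; exact h'),
        PySem.Dict.getD_of_not_contains _ _ h']
    rfl

lemma pvStepA_eq_modify (dico : List (String × Int)) (tab : PySem.Dict String (PySem.Dict String Int)) (cle : String) :
    pvStepA dico tab cle = tab.insert (pvPrefix cle) (pvInnerStep dico (tab.getD (pvPrefix cle) PySem.Dict.empty) cle) := by
  by_cases h : tab.contains (pvPrefix cle) = true
  · by_cases hv : (tab.getD (pvPrefix cle) PySem.Dict.empty).contains (pvThird cle) = true
    · simp [pvStepA, pvInnerStep, h, hv]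
    · have hv' : (tab.getD (pvPrefix cle) PySem.Dict.empty).contains (pvThird cle) = false := by
        simpa using hv
      simp [pvStepA, pvInnerStep, h, hv']
  · have h' : tab.contains (pvPrefix cle) = false := by simpa using h
    simp [pvStepA, pvInnerStep, h', PySem.Dict.getD_insert_self,
      PySem.Dict.insert_insert_self, PySem.Dict.getD_of_not_contains _ _ h',
      PySem.Dict.contains_empty]

lemma pvBuildInner_append (dico : List (String × Int)) (cs : List String) (cle : String) :
    pvBuildInner dico (cs ++ [cle]) = pvInnerStep dico (pvBuildInner dico cs) cle := by
  simp [pvBuildInner, pvInnerStep, List.foldl_append]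

lemma pvPhi_step (dico : List (String × Int)) (g : PySem.Dict String (List String)) (cle : String)
    (hnd : g.keys.Nodup) :
    pvPhi dico (pvStepG g cle) = pvStepA dico (pvPhi dico g) cle := by
  rw [pvStepA_eq_modify, pvGetD_phi _ _ _ hnd, ← pvBuildInner_append]
  show pvPhi dico (g.insert (pvPrefix cle) (g.getD (pvPrefix cle) [] ++ [cle]))
     = (pvPhi dico g).insert (pvPrefix cle) (pvBuildInner dico (g.getD (pvPrefix cle) [] ++ [cle]))
  by_cases h : g.contains (pvPrefix cle) = true
  · apply PySem.Dict.ext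
    rw [PySem.Dict.items_insert_of_contains _ _ (by rw [pvContains_phi]; exact h)]
    simp only [pvPhi, PySem.Dict.items_insert_of_contains _ _ h, List.map_map]
    apply List.map_congr_left
    intro p _
    by_cases hp : p.1 = pvPrefix cle
    · simp [hp]
    · simp [hp]
  · have h' : g.contains (pvPrefix cle) = false := by simpa using h
    apply PySem.Dict.ext
    rw [PySem.Dict.items_insert_of_not_contains _ _ (by rw [pvContains_phi]; exact h')]
    simp [pvPhi, PySem.Dict.items_insert_of_not_contains _ _ h']

lemma pvMain (dico : List (String × Int)) (ks : List String) (g : PySem.Dict String (List String))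
    (hnd : g.keys.Nodup) :
    ks.foldl (pvStepA dico) (pvPhi dico g) = pvPhi dico (ks.foldl pvStepG g) := by
  induction ks generalizing g with
  | nil => rfl
  | cons c ks ih =>
      simp only [List.foldl_cons]
      rw [← pvPhi_step dico g c hnd]
      exact ih _ (PySem.Dict.nodup_keys_insert _ _ _ hnd)

lemma pvNodupG (ks : List String) (g : PySem.Dict String (List String)) (hnd : g.keys.Nodup) :
    (ks.foldl pvStepG g).keys.Nodup := by
  have := PySem.Dict.nodup_keys_foldl_modify_key ks pvPrefix ([] : List String)
    (fun _ cle l => l ++ [cle]) g hnd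
  simpa [pvStepG] using this

lemma pvFinal (dico : List (String × Int)) : create_stats_table dico = create_stats_table_alt dico := by
  unfold create_stats_table create_stats_table_alt
  have h1 : (PySem.Dict.mk dico).keys.foldl (pvStepA dico) PySem.Dict.empty
      = pvPhi dico ((PySem.Dict.mk dico).keys.foldl pvStepG PySem.Dict.empty) :=
    pvMain dico _ _ PySem.Dict.nodup_keys_empty
  have hnod : ((PySem.Dict.mk dico).keys.foldl pvStepG PySem.Dict.empty).keys.Nodup :=
    pvNodupG _ _ PySem.Dict.nodup_keys_empty
  have h2 : (((PySem.Dict.mk dico).keys.foldl pvStepG PySem.Dict.empty).items.foldl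
        (fun (table : PySem.Dict String (PySem.Dict String Int)) p =>
          table.insert p.1 (pvBuildInner dico p.2)) PySem.Dict.empty).items
      = (pvPhi dico ((PySem.Dict.mk dico).keys.foldl pvStepG PySem.Dict.empty)).items := by
    rw [PySem.Dict.items_foldl_insert_fresh _ Prod.fst (fun p => pvBuildInner dico p.2)
      PySem.Dict.empty (fun a _ => PySem.Dict.contains_empty _) hnod]
    simp [pvPhi, PySem.Dict.empty]
  show ((PySem.Dict.mk dico).keys.foldl (pvStepA dico) PySem.Dict.empty).items.map (fun p => (p.1, p.2.items)) = _
  rw [h1]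
  show _ = (((PySem.Dict.mk dico).keys.foldl pvStepG PySem.Dict.empty).items.foldl
        (fun (table : PySem.Dict String (PySem.Dict String Int)) p =>
          table.insert p.1 (pvBuildInner dico p.2)) PySem.Dict.empty).items.map (fun p => (p.1, p.2.items))
  rw [h2]

-- ===== VERDICT (by name: the statement is the Claim_ definition above) =====
theorem create_stats_table_spec : Claim_equal_create_stats_table := by
  intro dico _ _
  exact pvFinal dico
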